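-- pv_equiv track=rewrite | github.com/siamarefin/InsLab | Lab2/task2.py | apply_mapping
-- ===== SOURCE A (Python) =====
-- from typing import List, Tuple
--
-- def apply_mapping(ct: str, mapc: List[str]) -> str:
--     out = []
--     o = out.append
--     for ch in ct:
--         if 'a' <= ch <= 'z':
--             o(mapc[ord(ch) - 97])
--         else:
--             o(ch)
--     return ''.join(out)
-- ===== SOURCE B (Python) =====
-- def apply_mapping(ct, mapc):
--     # Letter-major: one split/interleave pass per alphabet letter (26 passes),
--     # instead of A's char-major single loop. Replacement text is marked done so
--     # it is never re-substituted, matching A.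
--     segs = [(True, ct)]                      # (still_raw?, text)
--     for i in range(26):
--         c = chr(97 + i)
--         nxt = []
--         for raw, text in segs:
--             if raw and c in text:
--                 rep = mapc[i]
--                 parts = text.split(c)
--                 nxt.append((True, parts[0]))
--                 for part in parts[1:]:
--                     nxt.append((False, rep))
--                     nxt.append((True, part))
--             else:
--                 nxt.append((raw, text))
--         segs = nxt
--     return ''.join(text for _, text in segs)
-- ===== Notes on version B (the rewrite author's own statement) =====
-- stated objective: alternative
-- what changed: B is letter-major instead of char-major: it keeps a list of (raw, text) segments and runs 26 passes, one per alphabet letter, splitting every raw segment on that letter and interleaving the replacement as done segments, instead of A's single per-character branch-and-index loop.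
import Mathlib
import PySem

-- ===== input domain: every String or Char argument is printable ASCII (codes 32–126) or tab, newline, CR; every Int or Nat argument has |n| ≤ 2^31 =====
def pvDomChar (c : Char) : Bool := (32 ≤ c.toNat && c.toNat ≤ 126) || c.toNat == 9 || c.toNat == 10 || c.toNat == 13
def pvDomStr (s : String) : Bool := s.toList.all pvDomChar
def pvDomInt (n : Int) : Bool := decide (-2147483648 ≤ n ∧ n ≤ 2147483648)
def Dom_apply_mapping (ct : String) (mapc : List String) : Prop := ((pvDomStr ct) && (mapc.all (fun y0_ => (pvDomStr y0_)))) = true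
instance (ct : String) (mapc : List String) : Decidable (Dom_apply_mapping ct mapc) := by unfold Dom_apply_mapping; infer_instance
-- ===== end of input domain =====

-- B replaces A's char-major loop by a letter-major algorithm: 26 split/interleave passes
-- over a segment list, one per alphabet letter; alternative decomposition, same asymptotic cost.

-- ===== PORT A =====
-- literal port of A's loop: append mapc[ord(ch)-97] for lowercase ch, else ch, then ''.join
def apply_mapping (ct : String) (mapc : List String) : String :=
  PySem.Str.join "" (ct.toList.foldl
    (fun out ch =>
      if 'a' ≤ ch ∧ ch ≤ 'z' then
        out ++ [(PySem.List.pyGet? mapc ((ch.toNat : Int) - 97)).getD ""]   -- none = IndexError, excluded by Pre_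
      else
        out ++ [String.ofList [ch]]) [])

-- ===== PORT B =====
-- segs = [(True, ct)]; for i in range(26): split every raw segment on chr(97+i) and
-- interleave mapc[i] as done segments; finally join all segment texts
def apply_mapping_alt (ct : String) (mapc : List String) : String :=
  let final := (PySem.List.pyRange 0 26 1).foldl
    (fun segs i =>
      let c : Char := Char.ofNat (97 + i).toNat
      segs.foldl
        (fun nxt p =>
          if p.1 && PySem.Str.isIn (String.ofList [c]) p.2 then
            let rep := (PySem.List.pyGet? mapc i).getD ""   -- none = IndexError, excluded by Pre_
            let parts := (PySem.Chars.splitOn p.2.toList [c]).map String.ofList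
            (nxt ++ [(true, parts.headD "")]) ++
              (parts.drop 1).foldl (fun a part => a ++ [(false, rep), (true, part)]) []
          else nxt ++ [p])
        [])
    [(true, ct)]
  PySem.Str.join "" (final.map (·.2))

-- ===== PRECONDITION & SPEC =====
-- Pre_ excludes exactly the inputs on which the Python A raises IndexError: a lowercase
-- letter of ct whose index ord(ch)-97 is out of range of mapc (B raises there as well).
def Pre_apply_mapping (ct : String) (mapc : List String) : Prop :=
  (ct.toList.all (fun ch =>
    !(decide ('a' ≤ ch ∧ ch ≤ 'z')) || decide (ch.toNat - 97 < mapc.length))) = true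
instance (ct : String) (mapc : List String) : Decidable (Pre_apply_mapping ct mapc) := by
  unfold Pre_apply_mapping; infer_instance
def pvWitness_apply_mapping : String × List String := ("ab ba!", ["x", "y"])

def Spec_apply_mapping (ct : String) (mapc : List String) (out : String) : Prop := out = apply_mapping_alt ct mapc
instance (ct : String) (mapc : List String) (out : String) : Decidable (Spec_apply_mapping ct mapc out) := by unfold Spec_apply_mapping; infer_instance

-- ===== CLAIM (what is proved, stated in full; the proofs are below) =====
def Claim_equal_apply_mapping : Prop := ∀ (ct : String) (mapc : List String), Dom_apply_mapping ct mapc → Pre_apply_mapping ct mapc → Spec_apply_mapping ct mapc (apply_mapping ct mapc)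

-- ===== LEMMAS AND PROOFS =====

-- per-character substitution as a list of chars (A's action on one char)
def pvG (mapc : List String) (ch : Char) : List Char :=
  if 'a' ≤ ch ∧ ch ≤ 'z' then ((PySem.List.pyGet? mapc ((ch.toNat : Int) - 97)).getD "").toList
  else [ch]

-- value of a segment list: raw segments still await the full substitution
def pvFg (mapc : List String) (segs : List (Bool × String)) : List Char :=
  (segs.map (fun p => if p.1 then p.2.toList.flatMap (pvG mapc) else p.2.toList)).flatten

-- invariant after the first k passes: raw chars come from ct and no letter below k survives raw
def pvInv (ct : String) (k : Nat) (segs : List (Bool × String)) : Prop :=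
  ∀ p ∈ segs, p.1 = true → ∀ x ∈ p.2.toList,
    x ∈ ct.toList ∧ (('a' ≤ x ∧ x ≤ 'z') → k ≤ x.toNat - 97)

-- reference form of Python's one-char str.split
def pvSplitc (c : Char) : List Char → List (List Char)
  | [] => [[]]
  | x :: xs => if x = c then [] :: pvSplitc c xs
               else match pvSplitc c xs with
                 | [] => [[x]]
                 | h :: t => (x :: h) :: t

-- what one pass does to one segment, in flatMap form
def pvH (mapc : List String) (i : Int) (c : Char) (p : Bool × String) : List (Bool × String) :=
  if p.1 && PySem.Str.isIn (String.ofList [c]) p.2 then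
    (true, ((PySem.Chars.splitOn p.2.toList [c]).map String.ofList).headD "") ::
      (((PySem.Chars.splitOn p.2.toList [c]).map String.ofList).drop 1).flatMap
        (fun part => [(false, (PySem.List.pyGet? mapc i).getD ""), (true, part)])
  else [p]

def pvPass (mapc : List String) (i : Int) (segs : List (Bool × String)) : List (Bool × String) :=
  segs.flatMap (pvH mapc i (Char.ofNat (97 + i).toNat))

lemma pvSplitc_ne_nil (c : Char) (l : List Char) : pvSplitc c l ≠ [] := by
  cases l with
  | nil => simp [pvSplitc]
  | cons x xs =>
    simp only [pvSplitc]
    split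
    · simp
    · split <;> simp

lemma pvGo_eq (c : Char) : ∀ (fuel : Nat) (l cur : List Char) (acc : List (List Char)), l.length ≤ fuel →
    PySem.Chars.splitOn.go [c] fuel l cur acc
      = acc.reverse ++ (match pvSplitc c l with
          | [] => [cur.reverse]
          | h :: t => (cur.reverse ++ h) :: t) := by
  intro fuel
  induction fuel with
  | zero => intro l cur acc hl
            have : l = [] := by cases l <;> simp_all
            subst this
            simp [PySem.Chars.splitOn.go, pvSplitc]
  | succ f ih =>
    intro l cur acc hl
    cases l with
    | nil => simp [PySem.Chars.splitOn.go, pvSplitc]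
    | cons x rest =>
      simp only [List.length_cons, Nat.succ_le_succ_iff] at hl
      by_cases hx : x = c
      · subst hx
        rw [PySem.Chars.splitOn.go]
        have hpre : [x].isPrefixOf (x :: rest) = true := by simp [List.isPrefixOf]
        rw [if_pos hpre]
        simp only [List.length_cons, List.length_nil, List.drop_succ_cons, List.drop_zero]
        rw [ih rest [] (cur.reverse :: acc) (by simpa using hl)]
        simp only [pvSplitc]
        cases h : pvSplitc x rest with
        | nil => exact absurd h (pvSplitc_ne_nil x rest)
        | cons hh tt => simp
      · rw [PySem.Chars.splitOn.go]
        have hpre : [c].isPrefixOf (x :: rest) = false := by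
          simp [List.isPrefixOf]; exact fun h => absurd h.symm hx
        rw [if_neg (by simp [hpre])]
        rw [ih rest (x :: cur) acc hl]
        simp only [pvSplitc, if_neg hx]
        cases h : pvSplitc c rest with
        | nil => exact absurd h (pvSplitc_ne_nil c rest)
        | cons hh tt => simp

lemma pvSplitOn_eq (c : Char) (l : List Char) :
    PySem.Chars.splitOn l [c] = pvSplitc c l := by
  rw [PySem.Chars.splitOn, pvGo_eq c (l.length + 1) l [] [] (by omega)]
  cases h : pvSplitc c l with
  | nil => exact absurd h (pvSplitc_ne_nil c l)
  | cons hh tt => simp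

lemma pvSplitc_no_c (c : Char) : ∀ (l : List Char), ∀ q ∈ pvSplitc c l, c ∉ q := by
  intro l
  induction l with
  | nil => simp [pvSplitc]
  | cons x xs ih =>
    simp only [pvSplitc]
    by_cases hx : x = c
    · rw [if_pos hx]
      intro q hq
      rcases List.mem_cons.mp hq with h | h
      · subst h; simp
      · exact ih q h
    · rw [if_neg hx]
      cases h : pvSplitc c xs with
      | nil => exact absurd h (pvSplitc_ne_nil c xs)
      | cons hh tt =>
        intro q hq
        rcases List.mem_cons.mp hq with h' | h'
        · subst h'
          intro hc
          rcases List.mem_cons.mp hc with hc | hc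
          · exact hx hc.symm
          · exact (ih hh (by simp [h])) hc
        · exact ih q (by simp [h, h'])

lemma pvSplitc_subset (c : Char) : ∀ (l : List Char), ∀ q ∈ pvSplitc c l, ∀ x ∈ q, x ∈ l := by
  intro l
  induction l with
  | nil => simp [pvSplitc]
  | cons y xs ih =>
    simp only [pvSplitc]
    by_cases hy : y = c
    · rw [if_pos hy]
      intro q hq x hx
      rcases List.mem_cons.mp hq with h | h
      · subst h; simp at hx
      · exact List.mem_cons_of_mem y (ih q h x hx)
    · rw [if_neg hy]
      cases h : pvSplitc c xs with
      | nil => exact absurd h (pvSplitc_ne_nil c xs)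
      | cons hh tt =>
        intro q hq x hx
        rcases List.mem_cons.mp hq with h' | h'
        · subst h'
          rcases List.mem_cons.mp hx with h'' | h''
          · simp [h'']
          · exact List.mem_cons_of_mem y (ih hh (by simp [h]) x h'')
        · exact List.mem_cons_of_mem y (ih q (by simp [h, h']) x hx)

lemma pvFlatMap_splitc (g : Char → List Char) (c : Char) : ∀ (l : List Char),
    (match pvSplitc c l with
     | [] => []
     | h :: t => h.flatMap g ++ t.flatMap (fun q => g c ++ q.flatMap g)) = l.flatMap g := by
  intro l
  induction l with
  | nil => simp [pvSplitc]
  | cons x xs ih =>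
    simp only [pvSplitc]
    by_cases hx : x = c
    · subst hx
      rw [if_pos rfl]
      cases h : pvSplitc x xs with
      | nil => exact absurd h (pvSplitc_ne_nil x xs)
      | cons hh tt =>
        rw [h] at ih
        simp only [List.flatMap_cons, List.flatMap_nil, List.nil_append]
        rw [← ih]
        simp
    · rw [if_neg hx]
      cases h : pvSplitc c xs with
      | nil => exact absurd h (pvSplitc_ne_nil c xs)
      | cons hh tt =>
        rw [h] at ih
        simp only [List.flatMap_cons]
        rw [← ih]
        simp

lemma pvFg_append (mapc : List String) (s1 s2 : List (Bool × String)) :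
    pvFg mapc (s1 ++ s2) = pvFg mapc s1 ++ pvFg mapc s2 := by
  simp [pvFg]

lemma pvFg_cons (mapc : List String) (p : Bool × String) (segs : List (Bool × String)) :
    pvFg mapc (p :: segs)
      = (if p.1 then p.2.toList.flatMap (pvG mapc) else p.2.toList) ++ pvFg mapc segs := by
  simp [pvFg]

lemma pvFg_flatMap (mapc : List String) (h : Bool × String → List (Bool × String))
    (segs : List (Bool × String)) :
    pvFg mapc (segs.flatMap h) = (segs.map (fun p => pvFg mapc (h p))).flatten := by
  induction segs with
  | nil => simp [pvFg]
  | cons p rest ih => simp [List.flatMap_cons, pvFg_append, ih]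

-- character arithmetic for c = chr(97+k), k < 26
lemma pvChr_toNat (k : Nat) (hk : k < 26) : (Char.ofNat (97 + k)).toNat = 97 + k := by
  rw [Char.toNat_ofNat]
  have : (97 + k).isValidChar := by left; omega
  simp [this]

lemma pvLower_iff (x : Char) : ('a' ≤ x ∧ x ≤ 'z') ↔ (97 ≤ x.toNat ∧ x.toNat ≤ 122) := by
  constructor
  · intro h
    exact ⟨(Char.le_def.mp h.1), (Char.le_def.mp h.2)⟩
  · intro h
    exact ⟨Char.le_def.mpr h.1, Char.le_def.mpr h.2⟩

lemma pvChar_toNat_inj (x y : Char) (h : x.toNat = y.toNat) : x = y := by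
  apply Char.ext
  exact UInt32.toNat_inj.mp h

-- contribution of the interleaved done/raw segments of one split
lemma pvFg_interleave (mapc : List String) (rep : String) (t : List (List Char)) :
    pvFg mapc ((t.map String.ofList).flatMap (fun part => [(false, rep), (true, part)]))
      = t.flatMap (fun q => rep.toList ++ q.flatMap (pvG mapc)) := by
  induction t with
  | nil => simp [pvFg]
  | cons q qs ih =>
    simp only [List.map_cons, List.flatMap_cons, ← ih, pvFg, List.map_append, List.flatten_append]
    simp [String.toList_ofList]

-- one pass over one segment: value preserved, invariant advanced
lemma pvH_step (ct : String) (mapc : List String) (k : Nat) (hk : k < 26)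
    (p : Bool × String)
    (hp : p.1 = true → ∀ x ∈ p.2.toList,
      x ∈ ct.toList ∧ (('a' ≤ x ∧ x ≤ 'z') → k ≤ x.toNat - 97)) :
    pvFg mapc (pvH mapc (k : Int) (Char.ofNat (97 + (k : Int)).toNat) p) = pvFg mapc [p]
    ∧ ∀ q ∈ pvH mapc (k : Int) (Char.ofNat (97 + (k : Int)).toNat) p, q.1 = true →
        ∀ x ∈ q.2.toList, x ∈ ct.toList ∧ (('a' ≤ x ∧ x ≤ 'z') → k + 1 ≤ x.toNat - 97) := by
  have hcast : (97 + (k : Int)).toNat = 97 + k := by omega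
  set c : Char := Char.ofNat (97 + (k : Int)).toNat with hc
  have hcN : c.toNat = 97 + k := by rw [hc, hcast]; exact pvChr_toNat k hk
  have hne_c : ∀ x : Char, ('a' ≤ x ∧ x ≤ 'z') → x ≠ c → x.toNat - 97 ≠ k := by
    intro x hx hxc hxk
    have h97 : 97 ≤ x.toNat := ((pvLower_iff x).mp hx).1
    exact hxc (pvChar_toNat_inj x c (by omega))
  by_cases hcond : (p.1 && PySem.Str.isIn (String.ofList [c]) p.2) = true
  · obtain ⟨hp1, hisin⟩ := Bool.and_eq_true_iff.mp hcond
    have hcin : c ∈ p.2.toList := by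
      have := (PySem.Str.isIn_iff_infix (String.ofList [c]) p.2).mp hisin
      rw [String.toList_ofList] at this
      exact (List.singleton_infix_iff c p.2.toList).mp this
    have hlowc : 'a' ≤ c ∧ c ≤ 'z' := (pvLower_iff c).mpr (by omega)
    have hgc : pvG mapc c = ((PySem.List.pyGet? mapc (k : Int)).getD "").toList := by
      simp only [pvG, if_pos hlowc, hcN]
      norm_num
    -- the raw pieces of the split all satisfy the advanced invariant
    have hraw : ∀ q ∈ pvSplitc c p.2.toList, ∀ x ∈ q,
        x ∈ ct.toList ∧ (('a' ≤ x ∧ x ≤ 'z') → k + 1 ≤ x.toNat - 97) := by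
      intro q hq x hx
      have hxt : x ∈ p.2.toList := pvSplitc_subset c p.2.toList q hq x hx
      obtain ⟨hmem, hlow⟩ := hp hp1 x hxt
      refine ⟨hmem, fun hxl => ?_⟩
      have hxc : x ≠ c := fun h => (pvSplitc_no_c c p.2.toList q hq) (h ▸ hx)
      have := hne_c x hxl hxc
      have := hlow hxl
      omega
    unfold pvH
    rw [if_pos hcond]
    cases hL : pvSplitc c p.2.toList with
    | nil => exact absurd hL (pvSplitc_ne_nil c p.2.toList)
    | cons h t =>
      rw [pvSplitOn_eq, hL]
      simp only [List.map_cons, List.headD_cons, List.drop_one, List.tail_cons]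
      constructor
      · -- value of the new segments = value of p
        have hval := pvFlatMap_splitc (pvG mapc) c p.2.toList
        rw [hL] at hval
        have hval' : h.flatMap (pvG mapc)
            ++ t.flatMap (fun q => pvG mapc c ++ q.flatMap (pvG mapc))
            = p.2.toList.flatMap (pvG mapc) := by simpa using hval
        simp only [hgc] at hval'
        rw [pvFg_cons, pvFg_interleave]
        simp only [if_true, String.toList_ofList]
        rw [hval']
        simp [pvFg, hp1]
      · -- invariant
        intro q hq hq1 x hx
        rcases List.mem_cons.mp hq with h' | h'
        · subst h'
          simp only [String.toList_ofList] at hx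
          exact hraw h (by simp [hL]) x hx
        · obtain ⟨part, hpart, hqin⟩ := List.mem_flatMap.mp h'
          obtain ⟨q0, hq0, rfl⟩ := List.mem_map.mp hpart
          rcases List.mem_cons.mp hqin with h'' | h''
          · rw [h''] at hq1; simp at hq1
          · simp only [List.mem_singleton] at h''
            subst h''
            exact hraw q0 (by simp [hL, hq0]) x (by simpa using hx)
  · unfold pvH
    rw [if_neg hcond]
    refine ⟨rfl, ?_⟩
    intro q hq hq1 x hx
    simp only [List.mem_singleton] at hq
    rw [hq] at hq1 hx
    obtain ⟨hmem, hlow⟩ := hp hq1 x hx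
    refine ⟨hmem, fun hxl => ?_⟩
    have hk' := hlow hxl
    have hxc : x ≠ c := by
      intro hEq
      have hin : PySem.Str.isIn (String.ofList [c]) p.2 = true := by
        rw [PySem.Str.isIn_iff_infix, String.toList_ofList]
        exact (List.singleton_infix_iff c p.2.toList).mpr (hEq ▸ hx)
      simp [hq1] at hcond
      simp [hcond] at hin
    have := hne_c x hxl hxc
    omega

-- one whole pass
lemma pvPass_step (ct : String) (mapc : List String) (k : Nat) (hk : k < 26)
    (segs : List (Bool × String)) (hInv : pvInv ct k segs) :
    pvFg mapc (pvPass mapc (k : Int) segs) = pvFg mapc segs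
    ∧ pvInv ct (k + 1) (pvPass mapc (k : Int) segs) := by
  constructor
  · unfold pvPass
    rw [pvFg_flatMap]
    induction segs with
    | nil => simp [pvFg]
    | cons p rest ih =>
      have hp := (pvH_step ct mapc k hk p (hInv p (by simp))).1
      simp only [List.map_cons, List.flatten_cons, hp]
      rw [ih (fun q hq => hInv q (List.mem_cons_of_mem p hq))]
      simp [pvFg]
  · intro q hq
    unfold pvPass at hq
    obtain ⟨p, hp, hqp⟩ := List.mem_flatMap.mp hq
    exact (pvH_step ct mapc k hk p (hInv p hp)).2 q hqp

-- all passes from k to 26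
lemma pvFold_aux (ct : String) (mapc : List String) : ∀ (n k : Nat) (segs : List (Bool × String)),
    k + n = 26 → pvInv ct k segs →
    pvFg mapc (((List.range' k n).map Int.ofNat).foldl
        (fun s i => pvPass mapc i s) segs) = pvFg mapc segs
    ∧ pvInv ct 26 (((List.range' k n).map Int.ofNat).foldl
        (fun s i => pvPass mapc i s) segs) := by
  intro n
  induction n with
  | zero => intro k segs hkn hInv
            have hk26 : k = 26 := by omega
            subst hk26
            exact ⟨by simp, by simpa using hInv⟩
  | succ m ih =>
    intro k segs hkn hInv
    rw [show List.range' k (m + 1) = k :: List.range' (k + 1) m from rfl]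
    simp only [List.map_cons, List.foldl_cons]
    have hk : k < 26 := by omega
    obtain ⟨hval, hInv'⟩ := pvPass_step ct mapc k hk segs hInv
    obtain ⟨hval2, hInv2⟩ := ih (k + 1) (pvPass mapc (k : Int) segs) (by omega) hInv'
    exact ⟨hval2.trans hval, hInv2⟩

lemma pvFlatMap_id (mapc : List String) (l : List Char)
    (h : ∀ x ∈ l, ¬('a' ≤ x ∧ x ≤ 'z')) : l.flatMap (pvG mapc) = l := by
  induction l with
  | nil => simp
  | cons x xs ih =>
    simp only [List.flatMap_cons]
    rw [ih (fun y hy => h y (List.mem_cons_of_mem x hy))]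
    simp [pvG, h x (by simp)]

lemma pvFg_final (ct : String) (mapc : List String) (segs : List (Bool × String))
    (hInv : pvInv ct 26 segs) :
    pvFg mapc segs = (segs.map (fun p => p.2.toList)).flatten := by
  unfold pvFg
  congr 1
  apply List.map_congr_left
  intro p hp
  by_cases h1 : p.1 = true
  · simp only [h1, if_true]
    apply pvFlatMap_id
    intro x hx hlx
    have := (hInv p hp h1 x hx).2 hlx
    have := ((pvLower_iff x).mp hlx).2
    omega
  · simp [h1]

lemma pvJoin_nil_sep (L : List (List Char)) : PySem.Chars.join [] L = L.flatten := by
  induction L with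
  | nil => simp [PySem.Chars.join_nil]
  | cons h t ih =>
    cases t with
    | nil => simp [PySem.Chars.join, List.intercalate]
    | cons b tt =>
      rw [PySem.Chars.join_cons_cons, ih]
      simp

-- A's output in flatMap form
lemma pvA_toList (ct : String) (mapc : List String) :
    (apply_mapping ct mapc).toList = ct.toList.flatMap (pvG mapc) := by
  unfold apply_mapping
  have hfun : (fun (out : List String) ch =>
      if 'a' ≤ ch ∧ ch ≤ 'z' then
        out ++ [(PySem.List.pyGet? mapc ((ch.toNat : Int) - 97)).getD ""]
      else out ++ [String.ofList [ch]])
      = fun out ch => out ++ [if 'a' ≤ ch ∧ ch ≤ 'z' then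
          (PySem.List.pyGet? mapc ((ch.toNat : Int) - 97)).getD "" else String.ofList [ch]] := by
    funext out ch
    split <;> rfl
  rw [hfun, PySem.List.foldl_append_eq_flatMap, List.nil_append]
  rw [PySem.Str.toList_join]
  show PySem.Chars.join [] _ = _
  rw [pvJoin_nil_sep]
  induction ct.toList with
  | nil => simp
  | cons ch l ih =>
    simp only [List.flatMap_cons, List.map_append, List.flatten_append]
    rw [ih]
    congr 1
    simp [pvG, apply_ite String.toList, String.toList_ofList]

-- B's output as flatten of the final segments
lemma pvPass_fun_eq (mapc : List String) :
    (fun (segs : List (Bool × String)) (i : Int) =>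
      let c : Char := Char.ofNat (97 + i).toNat
      segs.foldl
        (fun nxt p =>
          if p.1 && PySem.Str.isIn (String.ofList [c]) p.2 then
            let rep := (PySem.List.pyGet? mapc i).getD ""
            let parts := (PySem.Chars.splitOn p.2.toList [c]).map String.ofList
            (nxt ++ [(true, parts.headD "")]) ++
              (parts.drop 1).foldl (fun a part => a ++ [(false, rep), (true, part)]) []
          else nxt ++ [p])
        [])
    = fun segs i => pvPass mapc i segs := by
  funext segs i
  show segs.foldl _ [] = segs.flatMap _
  have hstep : (fun (nxt : List (Bool × String)) p =>
      if p.1 && PySem.Str.isIn (String.ofList [Char.ofNat (97 + i).toNat]) p.2 then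
        (nxt ++ [(true, ((PySem.Chars.splitOn p.2.toList [Char.ofNat (97 + i).toNat]).map String.ofList).headD "")]) ++
          (((PySem.Chars.splitOn p.2.toList [Char.ofNat (97 + i).toNat]).map String.ofList).drop 1).foldl
            (fun a part => a ++ [(false, (PySem.List.pyGet? mapc i).getD ""), (true, part)]) []
      else nxt ++ [p])
      = fun nxt p => nxt ++ pvH mapc i (Char.ofNat (97 + i).toNat) p := by
    funext nxt p
    unfold pvH
    split
    · rw [show (fun (a : List (Bool × String)) part =>
          a ++ [(false, (PySem.List.pyGet? mapc i).getD ""), (true, part)])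
          = fun a part => a ++ (fun part => [(false, (PySem.List.pyGet? mapc i).getD ""), (true, part)]) part from rfl]
      rw [PySem.List.foldl_append_eq_flatMap, List.nil_append]
      simp
    · rfl
  rw [hstep, PySem.List.foldl_append_eq_flatMap, List.nil_append]

-- ===== VERDICT (by name: the statement is the Claim_ definition above) =====
theorem apply_mapping_spec : Claim_equal_apply_mapping := by
  intro ct mapc hdom hpre
  unfold Spec_apply_mapping
  apply String.toList_inj.mp
  rw [pvA_toList]
  unfold apply_mapping_alt
  rw [pvPass_fun_eq]
  have hrange : PySem.List.pyRange 0 26 1 = (List.range' 0 26).map Int.ofNat := by decide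
  rw [hrange]
  have hInv0 : pvInv ct 0 [(true, ct)] := by
    intro p hp hp1 x hx
    simp only [List.mem_singleton] at hp
    subst hp
    exact ⟨hx, fun _ => Nat.zero_le _⟩
  obtain ⟨hval, hInv⟩ := pvFold_aux ct mapc 26 0 [(true, ct)] rfl hInv0
  rw [PySem.Str.toList_join]
  show _ = PySem.Chars.join [] _
  rw [pvJoin_nil_sep, List.map_map]
  have hfin := pvFg_final ct mapc _ hInv
  rw [hval] at hfin
  have h0 : List.flatMap (pvG mapc) ct.toList = pvFg mapc [(true, ct)] := by simp [pvFg]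
  rw [h0, hfin]
  rfl
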